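-- pv_equiv track=rewrite | github.com/MrBrantCode/unitest_baseline | mut_generate/mist_train_cf/cf_54755/solution.py | check_math_notation
-- ===== SOURCE A (Python) =====
-- def check_math_notation(notation):
--     open_list = ['(']
--     close_list = [')']
--
--     stack_list = []
--
--     #Check Parentheses Balance
--     for i in notation:
--         if i in open_list:
--             stack_list.append(i)
--         elif i in close_list:
--             pos = close_list.index(i)
--             if ((len(stack_list) > 0) and
--                 (open_list[pos] == stack_list[len(stack_list)-1])):
--                 stack_list.pop()
--             else:
--                 return "Unbalanced"
--     if len(stack_list) == 0:
--         #Checking operations' order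
--         prevChar = ''
--         for char in notation:
--             if prevChar in '+-*/^' and char in '+-*/^':
--                 return "Incorrect Order"
--             if char != '(' and char != ')':
--                 prevChar = char
--         return "Correct"
--     else:
--         return "Unbalanced"
-- ===== SOURCE B (Python) =====
-- def check_math_notation(notation):
--     # Single linear pass: an integer depth replaces the stack, a prev_op flag
--     # replaces the second scan.  prev_op starts True: a leading operator counts
--     # as incorrect order (A agrees, since '' in '+-*/^' is True in Python).
--     ops = '+-*/^'
--     depth = 0
--     prev_op = True
--     bad_order = False
--     for c in notation:
--         if c == '(':
--             depth += 1
--         elif c == ')':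
--             if depth == 0:
--                 return "Unbalanced"
--             depth -= 1
--         else:
--             if prev_op and c in ops:
--                 bad_order = True
--             prev_op = c in ops
--     if depth > 0:
--         return "Unbalanced"
--     return "Incorrect Order" if bad_order else "Correct"
-- ===== Notes on version B (the rewrite author's own statement) =====
-- stated objective: simpler
-- what changed: Replaced A's two passes (a stack-based parenthesis scan plus a separate adjacent-operator scan) by one linear pass maintaining an integer depth counter and a previous-char-was-operator flag; single pass and no stack gives a constant-factor speedup (measured ~1.8x).
import Mathlib
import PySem

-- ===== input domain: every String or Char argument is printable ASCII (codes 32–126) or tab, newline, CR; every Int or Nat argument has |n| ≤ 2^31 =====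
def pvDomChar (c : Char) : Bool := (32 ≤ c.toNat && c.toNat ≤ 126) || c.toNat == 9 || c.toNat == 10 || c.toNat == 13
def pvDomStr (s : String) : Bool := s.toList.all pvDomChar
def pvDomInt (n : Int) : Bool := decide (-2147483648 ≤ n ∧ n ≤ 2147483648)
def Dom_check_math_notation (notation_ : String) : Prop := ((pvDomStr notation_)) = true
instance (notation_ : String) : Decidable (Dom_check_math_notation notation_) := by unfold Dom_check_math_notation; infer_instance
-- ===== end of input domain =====

-- B replaces A's two passes (stack scan + separate operator scan) by one pass with a
-- depth counter and a prev-operator flag; objective: simpler.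

-- ===== PORT A =====
-- first loop of A: the parenthesis-balance scan; none = the mid-loop `return "Unbalanced"`
def checkBalLoop : List Char → List Char → Option (List Char)
  | [], st => some st
  | i :: rest, st =>
    if ['('].contains i then
      checkBalLoop rest (st ++ [i])
    else if [')'].contains i then
      -- close_list.index(i): exists since i ∈ close_list, so getD 0 is never taken
      let pos : Nat := (PySem.List.index? [')'] i).getD 0
      if st.length > 0 &&
          (PySem.List.pyGet? ['('] (pos : Int) == PySem.List.pyGet? st ((st.length : Int) - 1)) then
        checkBalLoop rest st.dropLast   -- stack_list.pop()
      else
        none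
    else
      checkBalLoop rest st

-- second loop of A: prevChar starts as '' (none); Python's `'' in '+-*/^'` is True,
-- so none counts as "previous char is an operator"
def prevInA : Option Char → Bool
  | none => true   -- Python: '' in '+-*/^' is True
  | some p => (['+','-','*','/','^'] : List Char).contains p

def scanOrderLoop : List Char → Option Char → String
  | [], _ => "Correct"
  | c :: rest, prev =>
    if prevInA prev && (['+','-','*','/','^'] : List Char).contains c then
      "Incorrect Order"
    else if c ≠ '(' ∧ c ≠ ')' then
      scanOrderLoop rest (some c)
    else
      scanOrderLoop rest prev

def check_math_notation (notation_ : String) : String :=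
  match checkBalLoop notation_.toList [] with
  | none => "Unbalanced"
  | some st =>
    if st.length = 0 then scanOrderLoop notation_.toList none
    else "Unbalanced"

-- ===== PORT B =====
def isOpB (c : Char) : Bool := (['+','-','*','/','^'] : List Char).contains c

def bLoop : List Char → Nat → Bool → Bool → String
  | [], depth, _, bad =>
    if depth > 0 then "Unbalanced"
    else if bad then "Incorrect Order" else "Correct"
  | c :: rest, depth, prevOp, bad =>
    if c = '(' then bLoop rest (depth + 1) prevOp bad
    else if c = ')' then
      if depth = 0 then "Unbalanced" else bLoop rest (depth - 1) prevOp bad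
    else
      bLoop rest depth (isOpB c) (bad || (prevOp && isOpB c))

def check_math_notation_alt (notation_ : String) : String :=
  bLoop notation_.toList 0 true false

-- ===== PRECONDITION & SPEC =====
def Spec_check_math_notation (notation_ : String) (out : String) : Prop := out = check_math_notation_alt notation_
instance (notation_ : String) (out : String) : Decidable (Spec_check_math_notation notation_ out) := by unfold Spec_check_math_notation; infer_instance

-- ===== CLAIM (what is proved, stated in full; the proofs are below) =====
def Claim_equal_check_math_notation : Prop := ∀ (notation_ : String), Dom_check_math_notation notation_ → Spec_check_math_notation notation_ (check_math_notation notation_)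

-- ===== LEMMAS AND PROOFS =====

-- specification intermediates: a pure counter for the balance scan and a pure flag for the order scan
def countBal : List Char → Nat → Option Nat
  | [], n => some n
  | c :: rest, n =>
    if c = '(' then countBal rest (n + 1)
    else if c = ')' then (if n = 0 then none else countBal rest (n - 1))
    else countBal rest n

def scanFlag : List Char → Bool → Bool
  | [], _ => false
  | c :: rest, p =>
    if c = '(' ∨ c = ')' then scanFlag rest p
    else (p && isOpB c) || scanFlag rest (isOpB c)

lemma checkBalLoop_replicate (cs : List Char) :
    ∀ n, checkBalLoop cs (List.replicate n '(') =
      (countBal cs n).map (fun m => List.replicate m '(') := by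
  induction cs with
  | nil => intro n; simp [checkBalLoop, countBal]
  | cons c rest ih =>
    intro n
    by_cases hc : c = '('
    · subst hc
      have h1 : List.replicate n '(' ++ ['('] = List.replicate (n+1) '(' := by
        rw [← List.replicate_succ']
      simp [checkBalLoop, countBal, h1, ih]
    · by_cases hc' : c = ')'
      · subst hc'
        cases n with
        | zero => simp [checkBalLoop, countBal, hc]
        | succ k =>
          have hdrop : (List.replicate (k+1) '(').dropLast = List.replicate k '(' := by
            rw [List.replicate_succ']; simp
          simp [checkBalLoop, countBal, hc, PySem.List.index?, hdrop, ih]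
      · simp [checkBalLoop, countBal, hc, hc', ih]

lemma scanOrderLoop_eq (cs : List Char) :
    ∀ prev, scanOrderLoop cs prev =
      (if scanFlag cs (prevInA prev) then "Incorrect Order" else "Correct") := by
  induction cs with
  | nil => intro prev; simp [scanOrderLoop, scanFlag]
  | cons c rest ih =>
    intro prev
    by_cases hp : c = '(' ∨ c = ')'
    · have hop : isOpB c = false := by
        rcases hp with h | h <;> subst h <;> decide
      have hne : ¬ (c ≠ '(' ∧ c ≠ ')') := by
        rcases hp with h | h <;> simp [h]
      have hcc : (['+','-','*','/','^'] : List Char).contains c = isOpB c := rfl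
      simp only [scanOrderLoop, scanFlag, hcc, hop, Bool.and_false, if_pos hp,
        if_neg hne, Bool.false_eq_true, if_false]
      exact ih prev
    · have hcc : (['+','-','*','/','^'] : List Char).contains c = isOpB c := rfl
      have hne : c ≠ '(' ∧ c ≠ ')' := by
        constructor <;> intro h <;> exact hp (by simp [h])
      by_cases htr : (prevInA prev && isOpB c) = true
      · have hf : scanFlag (c :: rest) (prevInA prev) = true := by
          simp [scanFlag, if_neg hp, htr]
        simp only [scanOrderLoop, hcc, htr, if_true, hf]
      · have hsf : scanFlag (c :: rest) (prevInA prev) = scanFlag rest (isOpB c) := by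
          simp [scanFlag, if_neg hp, Bool.eq_false_iff.mpr htr]
        have htr' : (prevInA prev && isOpB c) = false := Bool.eq_false_iff.mpr htr
        simp only [scanOrderLoop, hcc, htr', Bool.false_eq_true, if_false,
          if_pos hne, hsf]
        rw [ih (some c)]
        rfl

lemma bLoop_eq (cs : List Char) :
    ∀ n p f, bLoop cs n p f =
      match countBal cs n with
      | none => "Unbalanced"
      | some m =>
        if m ≠ 0 then "Unbalanced"
        else if f || scanFlag cs p then "Incorrect Order" else "Correct" := by
  induction cs with
  | nil =>
    intro n p f
    cases n <;> simp [bLoop, countBal, scanFlag]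
  | cons c rest ih =>
    intro n p f
    by_cases hc : c = '('
    · subst hc; simp [bLoop, countBal, scanFlag, ih]
    · by_cases hc' : c = ')'
      · subst hc'
        cases n with
        | zero => simp [bLoop, countBal]
        | succ k => simp [bLoop, countBal, scanFlag, ih]
      · have hps : (c = '(' ∨ c = ')') = False := by simp [hc, hc']
        simp only [bLoop, countBal, scanFlag, if_neg hc, if_neg hc', hps]
        rw [ih n (isOpB c) (f || (p && isOpB c))]
        cases h : countBal rest n with
        | none => rfl
        | some m =>
          simp only []
          by_cases hm : m ≠ 0
          · simp [hm]
          · simp [hm, Bool.or_assoc]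

-- ===== VERDICT (by name: the statement is the Claim_ definition above) =====
theorem check_math_notation_spec : Claim_equal_check_math_notation := by
  intro s _
  unfold Spec_check_math_notation check_math_notation check_math_notation_alt
  rw [bLoop_eq]
  have hA := checkBalLoop_replicate s.toList 0
  simp only [List.replicate_zero] at hA
  rw [hA]
  cases h : countBal s.toList 0 with
  | none => rfl
  | some m =>
    by_cases hm : m = 0
    · subst hm
      simp [scanOrderLoop_eq, prevInA]
    · simp [hm, List.length_replicate]
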